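-- pv_equiv track=rewrite | github.com/CheHyeonYeong/CodingTestStudy | 프로그래머스/2/42626. 더 맵게/더 맵게.py | solution
-- ===== SOURCE A (Python) =====
-- import heapq
--
-- def solution(scoville, K):
--
--     heapq.heapify(scoville)  #
--     answer = 0
--
--     while scoville[0] < K:
--
--         if len(scoville) == 1 and scoville[0] < K:
--             return -1
--
--         first = heapq.heappop(scoville)
--         second = heapq.heappop(scoville)
--
--         new_value = first + (second * 2)
--         heapq.heappush(scoville, new_value)
--         answer += 1
--
--     return answer
-- ===== SOURCE B (Python) =====
-- def solution(scoville, K):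
--     scoville.sort()
--     answer = 0
--     while scoville[0] < K:
--         if len(scoville) == 1:
--             return -1
--         first = scoville.pop(0)
--         second = scoville.pop(0)
--         mixed = first + second * 2
--         lo, hi = 0, len(scoville)
--         while lo < hi:
--             mid = (lo + hi) // 2
--             if mixed < scoville[mid]:
--                 hi = mid
--             else:
--                 lo = mid + 1
--         scoville.insert(lo, mixed)
--         answer += 1
--     return answer
-- ===== Notes on version B (the rewrite author's own statement) =====
-- stated objective: alternative
-- what changed: Replaces the binary min-heap with a sorted list maintained in place: sort once, pop the two smallest from the front, and re-insert the mixed value at the position found by a hand-written binary search.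
import Mathlib
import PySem

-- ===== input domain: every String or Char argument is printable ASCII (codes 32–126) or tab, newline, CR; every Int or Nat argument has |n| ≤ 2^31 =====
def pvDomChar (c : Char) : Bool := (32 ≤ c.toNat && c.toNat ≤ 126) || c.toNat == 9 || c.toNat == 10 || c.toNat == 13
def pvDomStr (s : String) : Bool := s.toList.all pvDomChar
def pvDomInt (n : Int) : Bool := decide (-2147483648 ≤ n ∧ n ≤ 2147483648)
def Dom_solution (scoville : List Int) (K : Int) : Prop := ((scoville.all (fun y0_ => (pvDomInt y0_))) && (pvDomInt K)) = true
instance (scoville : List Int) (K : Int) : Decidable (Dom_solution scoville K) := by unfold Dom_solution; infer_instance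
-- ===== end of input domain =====

-- B replaces A's binary min-heap by a sorted list maintained with a hand-written
-- binary-search insertion (objective: alternative data structure; no speed claim).
-- Both A and B mutate the argument list in place (heapify/pops resp. sort/pops/insert);
-- the equivalence proved here is about the RETURN value only.

-- ===== PORT A =====
-- heapq is a stdlib call; it is ported by its observable contract: the heap is a bag
-- whose root is its minimum.  heapify is the identity on the bag, heappop returns the
-- minimum and removes one occurrence of it, heappush appends — exact for every value A
-- observes (the root scoville[0], the popped minima, the length).
def pvBagMin (l : List Int) : Int :=
  match l with
  | [] => 0            -- unreachable at every call site (the bag is nonempty there)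
  | x :: xs => xs.foldl min x

-- A's while-loop; fuel = the list's length, strictly more than the number of
-- iterations (each iteration shortens the list by one and the loop needs ≥ 1 element),
-- so the fuel-0 branch is unreachable from `solution`
def pvALoop : Nat → List Int → Int → Int → Int
  | 0, _, _, answer => answer
  | n + 1, l, K, answer =>
    match l with
    | [] => 0          -- unreachable: Python reads scoville[0] (IndexError); Pre_ excludes []
    | a :: t =>
      if pvBagMin (a :: t) < K then                  -- while scoville[0] < K
        if (a :: t).length = 1 ∧ pvBagMin (a :: t) < K then -1
        else
          -- first = heappop(scoville); second = heappop(scoville);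
          -- heappush(scoville, first + second * 2); answer += 1
          pvALoop n
            ((((a :: t).erase (pvBagMin (a :: t))).erase
                 (pvBagMin ((a :: t).erase (pvBagMin (a :: t))))) ++
               [pvBagMin (a :: t) + pvBagMin ((a :: t).erase (pvBagMin (a :: t))) * 2])
            K (answer + 1)
      else answer

def solution (scoville : List Int) (K : Int) : Int :=
  pvALoop scoville.length scoville K 0

-- ===== PORT B =====
-- port of Source B's inner 'while lo < hi' binary-search loop, step for step; fuel =
-- hi - lo at the call site, enough since hi - lo shrinks every iteration
-- (scoville[mid] is always in range at every reachable call: 0 ≤ lo ≤ mid < hi ≤ len)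
def pvBFind (l : List Int) (v : Int) : Nat → Int → Int → Int
  | 0, lo, _ => lo
  | n + 1, lo, hi =>
    if lo < hi then
      if v < PySem.List.pyGetD l (PySem.Int.floordiv (lo + hi) 2) 0 then
        pvBFind l v n lo (PySem.Int.floordiv (lo + hi) 2)
      else
        pvBFind l v n (PySem.Int.floordiv (lo + hi) 2 + 1) hi
    else lo

-- B's outer while-loop; fuel = the list's length, as for pvALoop
def pvBLoop : Nat → List Int → Int → Int → Int
  | 0, _, _, answer => answer
  | n + 1, l, K, answer =>
    match l with
    | [] => 0          -- unreachable: Python reads scoville[0] (IndexError); Pre_ excludes []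
    | x :: xs =>
      if x < K then                                  -- while scoville[0] < K
        match xs with
        | [] => -1                                   -- len(scoville) == 1: return -1
        | y :: ys =>
          -- first = scoville.pop(0); second = scoville.pop(0); mixed = first + second*2
          -- lo = binary search; scoville.insert(lo, mixed); answer += 1
          pvBLoop n
            (PySem.List.insert ys (pvBFind ys (x + y * 2) ys.length 0 (ys.length : Int))
              (x + y * 2))
            K (answer + 1)
      else answer

def solution_alt (scoville : List Int) (K : Int) : Int :=
  pvBLoop (PySem.List.sorted scoville (fun x => x) false).length
    (PySem.List.sorted scoville (fun x => x) false) K 0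

-- ===== PRECONDITION & SPEC =====
-- Pre_ excludes only the empty list, on which A raises IndexError at scoville[0]
-- (B raises there too).
def Pre_solution (scoville : List Int) (K : Int) : Prop := scoville ≠ []
instance (scoville : List Int) (K : Int) : Decidable (Pre_solution scoville K) := by
  unfold Pre_solution; infer_instance
def pvWitness_solution : List Int × Int := ([1, 2, 3, 9, 10, 12], 7)

def Spec_solution (scoville : List Int) (K : Int) (out : Int) : Prop := out = solution_alt scoville K
instance (scoville : List Int) (K : Int) (out : Int) : Decidable (Spec_solution scoville K out) := by unfold Spec_solution; infer_instance

-- ===== CLAIM (what is proved, stated in full; the proofs are below) =====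
def Claim_equal_solution : Prop := ∀ (scoville : List Int) (K : Int), Dom_solution scoville K → Pre_solution scoville K → Spec_solution scoville K (solution scoville K)

-- ===== LEMMAS AND PROOFS =====

-- foldl min: membership and lower bound
theorem foldl_min_mem : ∀ (t : List Int) (a : Int), t.foldl min a ∈ a :: t := by
  intro t
  induction t with
  | nil => intro a; simp
  | cons b t ih =>
    intro a
    simp only [List.foldl_cons]
    rcases List.mem_cons.1 (ih (min a b)) with h | h
    · rcases min_choice a b with hc | hc
      · rw [h, hc]; simp
      · rw [h, hc]; simp
    · simp [h]

theorem foldl_min_le : ∀ (t : List Int) (a : Int), ∀ y ∈ a :: t, t.foldl min a ≤ y := by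
  intro t
  induction t with
  | nil => intro a y hy; simp at hy; subst hy; simp
  | cons b t ih =>
    intro a y hy
    simp only [List.foldl_cons]
    have hacc : t.foldl min (min a b) ≤ min a b := ih (min a b) (min a b) (by simp)
    rcases List.mem_cons.1 hy with h | h
    · subst h; exact le_trans hacc (min_le_left _ _)
    · rcases List.mem_cons.1 h with h' | h'
      · subst h'; exact le_trans hacc (min_le_right _ _)
      · exact ih (min a b) y (by simp [h'])

theorem pvBagMin_mem (a : Int) (t : List Int) : pvBagMin (a :: t) ∈ a :: t := by
  simp only [pvBagMin]; exact foldl_min_mem t a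

theorem pvBagMin_le (a : Int) (t : List Int) : ∀ y ∈ a :: t, pvBagMin (a :: t) ≤ y := by
  simp only [pvBagMin]; exact foldl_min_le t a

-- the unique minimum value: pvBagMin equals the head of the sorted arrangement
theorem pvBagMin_eq_of_perm_sorted {l : List Int} {x : Int} {xs : List Int}
    (hs : PySem.List.sorted l (fun x => x) false = x :: xs) :
    ∀ (a : Int) (t : List Int), l.Perm (a :: t) → pvBagMin (a :: t) = x := by
  intro a t hp
  have hmem : pvBagMin (a :: t) ∈ l := hp.symm.subset (pvBagMin_mem a t)
  have hx : x ∈ l := by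
    have : x ∈ PySem.List.sorted l (fun x => x) false := by rw [hs]; simp
    exact (PySem.List.sorted_perm l (fun x => x) false).subset this
  have h1 : x ≤ pvBagMin (a :: t) := PySem.List.key_head_sorted_le l (fun x => x) hs _ hmem
  have h2 : pvBagMin (a :: t) ≤ x := pvBagMin_le a t x (hp.subset hx)
  omega

-- linear-insertion helper equal to B's binary-search insert; used only in the proofs
def insortL (v : Int) : List Int → List Int
  | [] => [v]
  | x :: xs => if x ≤ v then x :: insortL v xs else v :: x :: xs

theorem insortL_perm (v : Int) : ∀ (xs : List Int), (insortL v xs).Perm (v :: xs) := by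
  intro xs
  induction xs with
  | nil => simp [insortL]
  | cons x xs ih =>
    simp only [insortL]
    split
    · exact (ih.cons x).trans (List.Perm.swap v x xs)
    · exact List.Perm.refl _

theorem mem_insortL {v y : Int} : ∀ {xs : List Int}, y ∈ insortL v xs ↔ y = v ∨ y ∈ xs := by
  intro xs
  constructor
  · intro h
    have := (insortL_perm v xs).subset h
    simpa using this
  · intro h
    have : y ∈ v :: xs := by simpa using h
    exact (insortL_perm v xs).symm.subset this

theorem insortL_pairwise (v : Int) :
    ∀ (xs : List Int), xs.Pairwise (fun a b => a ≤ b) →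
      (insortL v xs).Pairwise (fun a b => a ≤ b) := by
  intro xs
  induction xs with
  | nil => intro _; simp [insortL]
  | cons x xs ih =>
    intro hp
    rw [List.pairwise_cons] at hp
    simp only [insortL]
    split
    · rw [List.pairwise_cons]
      refine ⟨?_, ih hp.2⟩
      intro y hy
      rcases mem_insortL.1 hy with h | h
      · omega
      · exact hp.1 y h
    · rw [List.pairwise_cons]
      refine ⟨?_, by rw [List.pairwise_cons]; exact hp⟩
      intro y hy
      rcases List.mem_cons.1 hy with h | h
      · omega
      · exact le_trans (by omega) (hp.1 y h)

-- pairwise ≤ gives monotone indexing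
theorem pairwise_getD_mono {s : List Int} (hs : s.Pairwise (fun a b => a ≤ b))
    {i j : Nat} (hij : i ≤ j) (hj : j < s.length) : s.getD i 0 ≤ s.getD j 0 := by
  rcases Nat.eq_or_lt_of_le hij with h | h
  · subst h; omega
  · have := (List.pairwise_iff_getElem (R := fun a b : Int => a ≤ b)).1 hs i j (by omega) hj h
    rw [List.getD_eq_getElem s 0 (by omega), List.getD_eq_getElem s 0 hj]
    exact this

-- B's binary search on a sorted list returns a Nat position with all elements before
-- it ≤ v and all elements from it on > v
theorem pvBFind_spec (s : List Int) (v : Int) (hs : s.Pairwise (fun a b => a ≤ b)) :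
    ∀ (n : Nat) (lo hi : Int), (hi - lo).toNat ≤ n →
    0 ≤ lo → lo ≤ hi → hi ≤ (s.length : Int) →
    (∀ i : Nat, (i : Int) < lo → s.getD i 0 ≤ v) →
    (∀ i : Nat, hi ≤ (i : Int) → i < s.length → v < s.getD i 0) →
    ∃ k : Nat, pvBFind s v n lo hi = (k : Int) ∧ k ≤ s.length ∧
      (∀ i : Nat, i < k → s.getD i 0 ≤ v) ∧
      (∀ i : Nat, k ≤ i → i < s.length → v < s.getD i 0) := by
  intro n
  induction n with
  | zero =>
    intro lo hi hfuel h0 hlh hhl hb ha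
    have heq : lo = hi := by omega
    simp only [pvBFind]
    exact ⟨lo.toNat, by omega, by omega,
      fun i hik => hb i (by omega), fun i hik hil => ha i (by omega) hil⟩
  | succ n ih =>
    intro lo hi hfuel h0 hlh hhl hb ha
    simp only [pvBFind]
    by_cases h : lo < hi
    · simp only [h, if_true]
      have hmid := PySem.Int.floordiv_two_mid_bounds (le_of_lt h)
      have hmidlt : PySem.Int.floordiv (lo + hi) 2 < hi :=
        (PySem.Int.floordiv_lt_iff_lt_mul (by norm_num)).2 (by omega)
      set mid := PySem.Int.floordiv (lo + hi) 2 with hmiddef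
      have hmr : PySem.List.pyGetD s mid 0 = s.getD mid.toNat 0 :=
        PySem.List.pyGetD_of_nonneg s 0 (by omega)
      have hmlen : mid.toNat < s.length := by omega
      by_cases hc : v < PySem.List.pyGetD s mid 0
      · simp only [hc, if_true]
        refine ih lo mid (by omega) h0 (by omega) (by omega) hb ?_
        intro i hi1 hi2
        have h1 : s.getD mid.toNat 0 ≤ s.getD i 0 := pairwise_getD_mono hs (by omega) hi2
        rw [hmr] at hc
        omega
      · simp only [hc, if_false]
        refine ih (mid + 1) hi (by omega) (by omega) (by omega) hhl ?_ ha
        intro i hi1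
        have h1 : s.getD i 0 ≤ s.getD mid.toNat 0 := pairwise_getD_mono hs (by omega) hmlen
        rw [hmr] at hc
        omega
    · simp only [h, if_false]
      have heq : lo = hi := by omega
      exact ⟨lo.toNat, by omega, by omega,
        fun i hik => hb i (by omega), fun i hik hil => ha i (by omega) hil⟩

-- a position with that bracketing property makes the positional insert equal to insortL
theorem insert_eq_insortL (v : Int) :
    ∀ (ys : List Int) (k : Nat), k ≤ ys.length →
    (∀ i : Nat, i < k → ys.getD i 0 ≤ v) →
    (∀ i : Nat, k ≤ i → i < ys.length → v < ys.getD i 0) →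
    PySem.List.insert ys (k : Int) v = insortL v ys := by
  intro ys
  induction ys with
  | nil =>
    intro k hk _ _
    have hk0 : k = 0 := by simpa using hk
    subst hk0
    simp [PySem.List.insert_zero, insortL]
  | cons y ys ih =>
    intro k hk hb ha
    rw [PySem.List.insert_natCast _ k v hk]
    cases k with
    | zero =>
      have : v < y := by simpa using ha 0 (by omega) (by simp)
      simp [insortL, show ¬ (y ≤ v) by omega]
    | succ k =>
      have hyv : y ≤ v := by simpa using hb 0 (by omega)
      have hrec : PySem.List.insert ys (k : Int) v = insortL v ys := by
        refine ih k (by simpa using hk) ?_ ?_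
        · intro i hik
          have := hb (i + 1) (by omega)
          simpa using this
        · intro i hik hil
          have := ha (i + 1) (by omega) (by simpa using hil)
          simpa using this
      rw [PySem.List.insert_natCast _ k v (by simpa using hk)] at hrec
      simp [insortL, hyv, List.take_succ_cons, List.drop_succ_cons, hrec]

-- the main loop correspondence: A's bag-with-minimum loop equals B's sorted-list loop
theorem loops_eq : ∀ (n : Nat) (l : List Int) (K ans : Int), l.length ≤ n → l ≠ [] →
    pvALoop n l K ans = pvBLoop n (PySem.List.sorted l (fun x => x) false) K ans := by
  intro n
  induction n with
  | zero =>
    intro l K ans hlen hne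
    cases l with
    | nil => exact absurd rfl hne
    | cons a t => simp at hlen
  | succ n ih =>
    intro l K ans hlen hne
    obtain ⟨a, t, rfl⟩ : ∃ a t, l = a :: t := by
      cases l with
      | nil => exact absurd rfl hne
      | cons a t => exact ⟨a, t, rfl⟩
    obtain ⟨x, xs, hs⟩ : ∃ x xs, PySem.List.sorted (a :: t) (fun x => x) false = x :: xs := by
      rcases h : PySem.List.sorted (a :: t) (fun x => x) false with _ | ⟨x, xs⟩
      · exact absurd ((PySem.List.sorted_eq_nil_iff _ _ _).1 h) (by simp)
      · exact ⟨x, xs, rfl⟩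
    have hperm : (PySem.List.sorted (a :: t) (fun x => x) false).Perm (a :: t) :=
      PySem.List.sorted_perm _ _ _
    have hpair : (x :: xs).Pairwise (fun u w : Int => u ≤ w) := by
      have := PySem.List.sorted_pairwise (a :: t) (fun x : Int => x)
      rw [hs] at this
      exact this
    have hm : pvBagMin (a :: t) = x := pvBagMin_eq_of_perm_sorted hs a t (List.Perm.refl _)
    have hxmem : x ∈ a :: t := hperm.subset (by rw [hs]; simp)
    have hlens : t.length + 1 = xs.length + 1 := by
      have := hperm.length_eq
      rw [hs] at this
      simpa using this.symm
    rw [hs]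
    simp only [pvALoop, pvBLoop, hm]
    by_cases hK : x < K
    · simp only [hK, if_true]
      cases xs with
      | nil =>
        have h1 : (a :: t).length = 1 := by
          simp only [List.length_cons, List.length_nil] at hlens ⊢
          omega
        simp [h1]
      | cons y ys =>
        have hlen2 : ¬((a :: t).length = 1) := by
          simp only [List.length_cons] at hlens ⊢
          omega
        simp only [hlen2, and_true, if_false]
        -- the two popped minima and the pushed value
        have hl1perm : ((a :: t).erase x).Perm (y :: ys) := by
          have h1 : (a :: t).Perm (x :: (a :: t).erase x) := List.perm_cons_erase hxmem
          exact (h1.symm.trans (hperm.symm.trans (by rw [hs]))).cons_inv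
        have htail : (y :: ys).Pairwise (fun u w : Int => u ≤ w) :=
          (List.pairwise_cons.1 hpair).2
        have hsecond : pvBagMin ((a :: t).erase x) = y := by
          obtain ⟨b, t1, hbt⟩ : ∃ b t1, (a :: t).erase x = b :: t1 := by
            rcases h : (a :: t).erase x with _ | ⟨b, t1⟩
            · rw [h] at hl1perm; have := hl1perm.length_eq; simp at this
            · exact ⟨b, t1, rfl⟩
          have hss : PySem.List.sorted (y :: ys) (fun x => x) false = y :: ys :=
            PySem.List.sorted_eq_self_of_pairwise _ _ htail
          rw [hbt]
          exact pvBagMin_eq_of_perm_sorted hss b t1 (hbt ▸ hl1perm).symm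
        have hymem : y ∈ (a :: t).erase x := hl1perm.symm.subset (by simp)
        have hl2perm : (((a :: t).erase x).erase y).Perm ys := by
          have h1 : ((a :: t).erase x).Perm (y :: ((a :: t).erase x).erase y) :=
            List.perm_cons_erase hymem
          exact (h1.symm.trans hl1perm).cons_inv
        rw [hsecond]
        -- B's binary search + insert is insortL
        obtain ⟨k, hk1, hk2, hk3, hk4⟩ :=
          pvBFind_spec ys (x + y * 2) ((List.pairwise_cons.1 htail).2) ys.length 0
            (ys.length : Int) (by omega) (by omega) (by omega) (by omega)
            (by intro i hik; omega) (by intro i h1 h2; omega)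
        have hins : PySem.List.insert ys (pvBFind ys (x + y * 2) ys.length 0 (ys.length : Int))
            (x + y * 2) = insortL (x + y * 2) ys := by
          rw [hk1]
          exact insert_eq_insortL (x + y * 2) ys k hk2 hk3 hk4
        -- A's pushed bag sorts to exactly that list
        have hsortpush :
            PySem.List.sorted ((((a :: t).erase x).erase y) ++ [x + y * 2]) (fun x => x) false
              = insortL (x + y * 2) ys := by
          have h1 : ((((a :: t).erase x).erase y) ++ [x + y * 2]).Perm (ys ++ [x + y * 2]) :=
            hl2perm.append_right [x + y * 2]
          have h2 : (insortL (x + y * 2) ys).Perm (ys ++ [x + y * 2]) :=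
            (insortL_perm (x + y * 2) ys).trans (List.perm_append_singleton (x + y * 2) ys).symm
          calc PySem.List.sorted ((((a :: t).erase x).erase y) ++ [x + y * 2]) (fun x => x) false
              = PySem.List.sorted (ys ++ [x + y * 2]) (fun x => x) false :=
                PySem.List.sorted_eq_sorted_of_perm _ _ _ (fun _ _ h => h) h1
            _ = insortL (x + y * 2) ys :=
                PySem.List.sorted_id_eq_of_perm_of_pairwise _ _ h2
                  (insortL_pairwise (x + y * 2) ys ((List.pairwise_cons.1 htail).2))
        have hlenpush : ((((a :: t).erase x).erase y) ++ [x + y * 2]).length ≤ n := by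
          have h1 := hl2perm.length_eq
          simp only [List.length_cons, List.length_append, List.length_nil] at h1 hlens hlen ⊢
          omega
        rw [ih _ K (ans + 1) hlenpush (by simp), hsortpush, hins]
    · simp [hK]

-- ===== VERDICT (by name: the statement is the Claim_ definition above) =====
theorem solution_spec : Claim_equal_solution := by
  intro scoville K _ hpre
  unfold Spec_solution solution solution_alt
  rw [PySem.List.length_sorted]
  exact loops_eq scoville.length scoville K 0 (le_refl _) hpre
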